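-- pv_equiv track=rewrite | github.com/stanwu4/pokerAI | src/calculatePreflop.py | drawCardsForHandType
-- ===== SOURCE A (Python) =====
-- def drawCardsForHandType(handType,cards):
--     card1 = handType[0]
--     card2 = handType[1]
--     suited = handType[2] == 's'
--     paired = card1 == card2
--
--     hand = []
--     for card in cards:
--         if len(hand) == 0:
--             if card[0] == card1 or card[0] == card2:
--                 hand.append(card)
--         elif card[0] != hand[0][0]:
--             if card[0] == card1 or card[0] == card2:
--                 if (card[1] == hand[0][1]) == suited:
--                     hand.append(card)
--                     break
--         elif paired:
--             hand.append(card)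
--             break
--     for card in hand:
--         cards.remove(card)
--     return hand
-- ===== SOURCE B (Python) =====
-- def drawCardsForHandType(handType, cards):
--     card1 = handType[0]
--     card2 = handType[1]
--     suited = handType[2] == 's'
--
--     matches = [c for c in cards if c[0] == card1 or c[0] == card2]
--     if not matches:
--         return []
--     f = matches[0]
--     if card1 == card2:
--         hand = matches[:2]
--     else:
--         candidates = [c for c in matches[1:]
--                       if c[0] != f[0] and (c[1] == f[1]) == suited]
--         hand = [f] + candidates[:1]
--     for c in hand:
--         cards.remove(c)
--     return hand
-- ===== Notes on version B (the rewrite author's own statement) =====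
-- stated objective: simpler
-- what changed: Replaces A's single stateful break-loop with a growing hand list by a pure filter/slice pipeline: one comprehension collects all rank-matching cards, the pair case is just matches[:2], and the unpaired case slices one card off a second filtered candidate list.
-- outside the precondition, e.g. on drawCardsForHandType('AAx', ['As', 'Ah', '']): A returns ['As', 'Ah'], B raises IndexError; on drawCardsForHandType('AKo', ['As', 'A']): A returns ['As'], B returns ['As']; on drawCardsForHandType('AKo', ['Ah', 'Ks', 'A']): A returns ['Ah', 'Ks'], B returns ['Ah', 'Ks']
import Mathlib
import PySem

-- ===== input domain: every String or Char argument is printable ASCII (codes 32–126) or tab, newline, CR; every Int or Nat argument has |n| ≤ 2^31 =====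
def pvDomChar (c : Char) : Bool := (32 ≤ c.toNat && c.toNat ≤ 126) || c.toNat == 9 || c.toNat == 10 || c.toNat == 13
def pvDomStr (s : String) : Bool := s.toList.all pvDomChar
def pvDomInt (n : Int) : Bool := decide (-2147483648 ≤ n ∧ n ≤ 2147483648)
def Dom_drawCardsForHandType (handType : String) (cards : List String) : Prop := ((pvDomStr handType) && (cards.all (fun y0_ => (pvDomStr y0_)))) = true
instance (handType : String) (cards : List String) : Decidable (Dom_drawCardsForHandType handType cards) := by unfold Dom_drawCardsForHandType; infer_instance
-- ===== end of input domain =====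

-- B replaces A's single stateful break-loop by a pure filter/slice pipeline (simpler decomposition,
-- same cost). Equivalence is about the RETURN value; both Pythons additionally remove the
-- returned cards from `cards` in the same way (same values, same order).

-- ===== PORT A =====
-- A's for-loop over cards with the growing `hand` accumulator; the two `break`s are the
-- non-recursive `hand ++ [card]` results.
def pvALoop (card1 card2 : Char) (suited paired : Bool) (hand : List String) : List String → List String
  | [] => hand
  | card :: rest =>
    match hand with
    | [] =>
      if PySem.Str.pyGet? card 0 == some card1 || PySem.Str.pyGet? card 0 == some card2 then
        pvALoop card1 card2 suited paired [card] rest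
      else
        pvALoop card1 card2 suited paired [] rest
    | h0 :: _ =>
      if PySem.Str.pyGet? card 0 != PySem.Str.pyGet? h0 0 then
        if PySem.Str.pyGet? card 0 == some card1 || PySem.Str.pyGet? card 0 == some card2 then
          if (PySem.Str.pyGet? card 1 == PySem.Str.pyGet? h0 1) == suited then
            hand ++ [card]  -- break
          else
            pvALoop card1 card2 suited paired hand rest
        else
          pvALoop card1 card2 suited paired hand rest
      else if paired then
        hand ++ [card]  -- break
      else
        pvALoop card1 card2 suited paired hand rest

def drawCardsForHandType (handType : String) (cards : List String) : List String :=
  match PySem.Str.pyGet? handType 0, PySem.Str.pyGet? handType 1, PySem.Str.pyGet? handType 2 with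
  | some card1, some card2, some c3 =>
      pvALoop card1 card2 (c3 == 's') (card1 == card2) [] cards
  | _, _, _ => []  -- Python raises IndexError on handType here; excluded by Pre_

-- ===== PORT B =====
-- Source B: `matches` is one list comprehension (List.filter); `matches[:2]` and `candidates[:1]`
-- are the slices-from-zero, ported as List.take 2 / List.take 1.
def drawCardsForHandType_alt (handType : String) (cards : List String) : List String :=
  match PySem.Str.pyGet? handType 0 with
  | none => []  -- excluded by Pre_
  | some card1 =>
  match PySem.Str.pyGet? handType 1 with
  | none => []  -- excluded by Pre_
  | some card2 =>
  match PySem.Str.pyGet? handType 2 with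
  | none => []  -- excluded by Pre_
  | some c3 =>
    let suited := c3 == 's'
    let ms0 := cards.filter (fun c =>
      PySem.Str.pyGet? c 0 == some card1 || PySem.Str.pyGet? c 0 == some card2)
    match ms0 with
    | [] => []
    | f :: ms =>
      if card1 == card2 then (f :: ms).take 2
      else
        let candidates := ms.filter (fun c =>
          PySem.Str.pyGet? c 0 != PySem.Str.pyGet? f 0 &&
          ((PySem.Str.pyGet? c 1 == PySem.Str.pyGet? f 1) == suited))
        f :: candidates.take 1

-- ===== PRECONDITION & SPEC =====
-- Python A raises IndexError when handType has fewer than 3 characters, or when it inspects a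
-- card shorter than the index it reads: every inspected card's first character is read, and a
-- card's second character is read only if its first character matches handType[0] or handType[1].
-- This is still slightly NARROWER than "A returns": cards occurring after the loop `break`s (hand
-- complete) are never inspected at all, and a matching 1-char card whose second character A never
-- actually reaches (e.g. it equals the first card's rank in an unpaired hand) also returns; a
-- closed-form condition cannot track which cards the loop inspects, so those runs are excluded.
def Pre_drawCardsForHandType (handType : String) (cards : List String) : Prop :=
  (3 : Int) ≤ PySem.Str.len handType ∧
  ∀ c ∈ cards, (1 : Int) ≤ PySem.Str.len c ∧
    ((PySem.Str.pyGet? c 0 = PySem.Str.pyGet? handType 0 ∨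
      PySem.Str.pyGet? c 0 = PySem.Str.pyGet? handType 1) → (2 : Int) ≤ PySem.Str.len c)
instance (handType : String) (cards : List String) : Decidable (Pre_drawCardsForHandType handType cards) := by unfold Pre_drawCardsForHandType; infer_instance

def pvWitness_drawCardsForHandType : String × List String := ("AKs", ["Kh", "2c", "Ah", "As"])

def Spec_drawCardsForHandType (handType : String) (cards : List String) (out : List String) : Prop := out = drawCardsForHandType_alt handType cards
instance (handType : String) (cards : List String) (out : List String) : Decidable (Spec_drawCardsForHandType handType cards out) := by unfold Spec_drawCardsForHandType; infer_instance

-- ===== CLAIM (what is proved, stated in full; the proofs are below) =====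
def Claim_equal_drawCardsForHandType : Prop := ∀ (handType : String) (cards : List String), Dom_drawCardsForHandType handType cards → Pre_drawCardsForHandType handType cards → Spec_drawCardsForHandType handType cards (drawCardsForHandType handType cards)

-- ===== LEMMAS AND PROOFS =====

-- phase 2, pair hand (card2 = card1, the first card's rank is card1): A's loop with a first
-- card found equals "first later rank-matching card", i.e. B's matches[:2] tail.
theorem pvALoop_phase2_paired (card1 : Char) (suited : Bool) (f : String)
    (hf : PySem.List.pyGet? f.toList 0 = some card1)
    (rest : List String) :
    pvALoop card1 card1 suited true [f] rest =
      f :: (rest.filter (fun c =>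
        PySem.Str.pyGet? c 0 == some card1 || PySem.Str.pyGet? c 0 == some card1)).take 1 := by
  induction rest with
  | nil => simp [pvALoop]
  | cons c cs ih =>
    by_cases hc : PySem.List.pyGet? c.toList 0 = some card1
    · simp [pvALoop, List.filter, hc, hf]
    · have hcb : (PySem.List.pyGet? c.toList 0 == some card1) = false := by simpa using hc
      simp [pvALoop, List.filter, hf, hcb, hc, ih]

-- phase 2, unpaired hand: A's loop with a first card found equals B's candidate filter
-- over the later rank-matching cards, cut to one element.
theorem pvALoop_phase2_unpaired (card1 card2 : Char) (suited : Bool) (f : String)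
    (rest : List String) :
    pvALoop card1 card2 suited false [f] rest =
      f :: ((rest.filter (fun c =>
              PySem.Str.pyGet? c 0 == some card1 || PySem.Str.pyGet? c 0 == some card2)).filter
            (fun c =>
              PySem.Str.pyGet? c 0 != PySem.Str.pyGet? f 0 &&
              ((PySem.Str.pyGet? c 1 == PySem.Str.pyGet? f 1) == suited))).take 1 := by
  induction rest with
  | nil => simp [pvALoop]
  | cons c cs ih =>
    by_cases hc : PySem.List.pyGet? c.toList 0 = PySem.List.pyGet? f.toList 0
    · have hb0 : (PySem.List.pyGet? c.toList 0 != PySem.List.pyGet? f.toList 0) = false := by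
        simp [bne, hc]
      by_cases hm : PySem.List.pyGet? c.toList 0 = some card1 ∨ PySem.List.pyGet? c.toList 0 = some card2
      · have hmb : (PySem.List.pyGet? c.toList 0 == some card1 ||
            PySem.List.pyGet? c.toList 0 == some card2) = true := by simpa using hm
        simp [pvALoop, List.filter, hb0, hmb, ih]
      · have hmb : (PySem.List.pyGet? c.toList 0 == some card1 ||
            PySem.List.pyGet? c.toList 0 == some card2) = false := by simpa using hm
        simp [pvALoop, List.filter, hb0, hmb, ih]
    · have hnb : (PySem.List.pyGet? c.toList 0 != PySem.List.pyGet? f.toList 0) = true := by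
        simpa [bne] using hc
      by_cases hm : PySem.List.pyGet? c.toList 0 = some card1 ∨ PySem.List.pyGet? c.toList 0 = some card2
      · have hmb : (PySem.List.pyGet? c.toList 0 == some card1 ||
            PySem.List.pyGet? c.toList 0 == some card2) = true := by simpa using hm
        by_cases hs : (PySem.List.pyGet? c.toList 1 == PySem.List.pyGet? f.toList 1) = suited
        · simp [pvALoop, List.filter, hnb, hmb, hs]
        · have hsb : ((PySem.List.pyGet? c.toList 1 == PySem.List.pyGet? f.toList 1) == suited) = false := by
            simpa using hs
          simp [pvALoop, List.filter, hnb, hmb, hsb, ih]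
      · have hmb : (PySem.List.pyGet? c.toList 0 == some card1 ||
            PySem.List.pyGet? c.toList 0 == some card2) = false := by simpa using hm
        simp [pvALoop, List.filter, hnb, hmb, ih]

-- the whole body after the handType accesses: A's loop equals B's filter/slice pipeline
theorem pvMain (card1 card2 c3 : Char) (cards : List String) :
    pvALoop card1 card2 (c3 == 's') (card1 == card2) [] cards =
      (match cards.filter (fun c =>
          PySem.Str.pyGet? c 0 == some card1 || PySem.Str.pyGet? c 0 == some card2) with
       | [] => []
       | f :: ms =>
         if card1 == card2 then (f :: ms).take 2
         else f :: (ms.filter (fun c =>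
             PySem.Str.pyGet? c 0 != PySem.Str.pyGet? f 0 &&
             ((PySem.Str.pyGet? c 1 == PySem.Str.pyGet? f 1) == (c3 == 's')))).take 1) := by
  induction cards with
  | nil => simp [pvALoop]
  | cons c cs ih =>
    by_cases hp : PySem.List.pyGet? c.toList 0 = some card1 ∨ PySem.List.pyGet? c.toList 0 = some card2
    · have hpb : (PySem.List.pyGet? c.toList 0 == some card1 ||
          PySem.List.pyGet? c.toList 0 == some card2) = true := by simpa using hp
      by_cases hcc : card1 = card2
      · subst hcc
        have hf : PySem.List.pyGet? c.toList 0 = some card1 := by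
          rcases hp with h | h <;> exact h
        have hl : pvALoop card1 card1 (c3 == 's') (card1 == card1) [] (c :: cs) =
            pvALoop card1 card1 (c3 == 's') true [c] cs := by
          simp [pvALoop, hf]
        rw [hl, pvALoop_phase2_paired card1 (c3 == 's') c hf cs]
        simp [List.filter, hf, List.take]
      · have hne : (card1 == card2) = false := by simpa using hcc
        have hl : pvALoop card1 card2 (c3 == 's') (card1 == card2) [] (c :: cs) =
            pvALoop card1 card2 (c3 == 's') false [c] cs := by
          simp [pvALoop, hpb, hne]
        rw [hl, pvALoop_phase2_unpaired card1 card2 (c3 == 's') c cs]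
        simp [List.filter, hpb, hne]
    · have hpb : (PySem.List.pyGet? c.toList 0 == some card1 ||
          PySem.List.pyGet? c.toList 0 == some card2) = false := by simpa using hp
      simpa [pvALoop, List.filter, hpb] using ih

-- ===== VERDICT (by name: the statement is the Claim_ definition above) =====
theorem drawCardsForHandType_spec : Claim_equal_drawCardsForHandType := by
  intro handType cards _ _
  unfold Spec_drawCardsForHandType drawCardsForHandType drawCardsForHandType_alt
  cases h0 : PySem.Str.pyGet? handType 0 with
  | none => rfl
  | some card1 =>
    cases h1 : PySem.Str.pyGet? handType 1 with
    | none => rfl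
    | some card2 =>
      cases h2 : PySem.Str.pyGet? handType 2 with
      | none => rfl
      | some c3 =>
        exact pvMain card1 card2 c3 cards
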